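-- pv_equiv track=rewrite | github.com/TianleJin/Algorithmic-Contests-Solutions | Google-Kickstart-2019-Round-A/a.py | withinK
-- ===== SOURCE A (Python) =====
-- def withinK(k, r, c, dist, mat):
--     plus = []
--     minus = []
--     for r0 in range(r):
--         for c0 in range(c):
--             if dist[r0][c0] > k:
--                 plus.append(r0 + c0)
--                 minus.append(r0 - c0)
--
--     if not plus:
--         return True
--
--     min_minus = min(minus)
--     max_minus = max(minus)
--     min_plus = min(plus)
--     max_plus = max(plus)
--
--     for r0 in range(r):
--         for c0 in range(c):
--             if not mat[r0][c0]:
--                 max_distance = max(abs(min_plus - (r0 + c0)), abs(max_plus - (r0 + c0)), abs(min_minus - (r0 - c0)), abs(max_minus - (r0 - c0)))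
--                 if max_distance <= k:
--                     return True
--     return False
-- ===== SOURCE B (Python) =====
-- def withinK(k, r, c, dist, mat):
--     far = [(r0, c0) for r0 in range(r) for c0 in range(c) if dist[r0][c0] > k]
--     if not far:
--         return True
--     for r0 in range(r):
--         for c0 in range(c):
--             if not mat[r0][c0]:
--                 if all(abs(r0 - fr) + abs(c0 - fc) <= k for fr, fc in far):
--                     return True
--     return False
-- ===== Notes on version B (the rewrite author's own statement) =====
-- stated objective: simpler
-- what changed: B collects the far cells once and tests each empty cell by scanning that list directly with max Manhattan distance <= k, instead of A's four min/max extremes of r+c and r-c with the Chebyshev-transform O(1) per-cell check.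
import Mathlib
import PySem

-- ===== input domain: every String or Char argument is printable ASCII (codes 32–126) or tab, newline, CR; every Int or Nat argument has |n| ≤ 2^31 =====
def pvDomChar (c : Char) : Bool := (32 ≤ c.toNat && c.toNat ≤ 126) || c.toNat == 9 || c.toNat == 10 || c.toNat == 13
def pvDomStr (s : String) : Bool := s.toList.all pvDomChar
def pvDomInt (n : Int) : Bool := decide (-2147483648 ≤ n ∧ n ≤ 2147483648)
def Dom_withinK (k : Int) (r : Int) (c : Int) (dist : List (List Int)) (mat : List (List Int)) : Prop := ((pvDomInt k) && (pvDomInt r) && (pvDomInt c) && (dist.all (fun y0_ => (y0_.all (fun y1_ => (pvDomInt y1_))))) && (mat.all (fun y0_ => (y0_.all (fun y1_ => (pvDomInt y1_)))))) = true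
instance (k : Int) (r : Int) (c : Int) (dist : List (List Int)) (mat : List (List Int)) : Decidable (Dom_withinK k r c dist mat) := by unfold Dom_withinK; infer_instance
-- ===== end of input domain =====

-- B replaces A's four min/max extremes of r+c / r-c (Chebyshev-transform O(1) per-cell check)
-- by a direct scan over the collected far cells for each empty cell: simpler, not faster.

-- ===== PORT A =====
def withinK (k : Int) (r : Int) (c : Int) (dist : List (List Int)) (mat : List (List Int)) : Bool :=
  let pm : List Int × List Int :=
    (PySem.List.pyRange 0 r 1).foldl (fun acc r0 =>
      (PySem.List.pyRange 0 c 1).foldl (fun acc c0 =>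
        if PySem.List.pyGetD (PySem.List.pyGetD dist r0 []) c0 0 > k then
          (acc.1 ++ [r0 + c0], acc.2 ++ [r0 - c0])
        else acc) acc) ([], [])
  if pm.1 = [] then true
  else
    let min_minus := (PySem.List.min? pm.2 (fun y => y)).getD 0
    let max_minus := (PySem.List.max? pm.2 (fun y => y)).getD 0
    let min_plus := (PySem.List.min? pm.1 (fun y => y)).getD 0
    let max_plus := (PySem.List.max? pm.1 (fun y => y)).getD 0
    (PySem.List.pyRange 0 r 1).any (fun r0 =>
      (PySem.List.pyRange 0 c 1).any (fun c0 =>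
        if PySem.List.pyGetD (PySem.List.pyGetD mat r0 []) c0 0 = 0 then
          decide (max (max (max |min_plus - (r0 + c0)| |max_plus - (r0 + c0)|)
                           |min_minus - (r0 - c0)|) |max_minus - (r0 - c0)| ≤ k)
        else false))

-- ===== PORT B =====
def withinK_alt (k : Int) (r : Int) (c : Int) (dist : List (List Int)) (mat : List (List Int)) : Bool :=
  let far : List (Int × Int) :=
    (PySem.List.pyRange 0 r 1).flatMap (fun r0 =>
      ((PySem.List.pyRange 0 c 1).filter (fun c0 =>
        decide (PySem.List.pyGetD (PySem.List.pyGetD dist r0 []) c0 0 > k))).map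
        (fun c0 => (r0, c0)))
  if far = [] then true
  else
    (PySem.List.pyRange 0 r 1).any (fun r0 =>
      (PySem.List.pyRange 0 c 1).any (fun c0 =>
        if PySem.List.pyGetD (PySem.List.pyGetD mat r0 []) c0 0 = 0 then
          far.all (fun p => decide (|r0 - p.1| + |c0 - p.2| ≤ k))
        else false))

-- ===== PRECONDITION & SPEC =====
-- Pre_ admits exactly the inputs on which A returns normally: a dist well-formed over the
-- scanned range, and then either no far cell, or a mat well-formed over that range, or an
-- early success cell (empty and within k of every far cell) reached before any malformed mat
-- access; every excluded input makes A raise IndexError (and B, scanning in the same order,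
-- raises there too).
def Pre_withinK (k : Int) (r : Int) (c : Int) (dist : List (List Int)) (mat : List (List Int)) : Prop :=
  (r ≤ 0 ∨ c ≤ 0) ∨
  (r ≤ (dist.length : Int) ∧ (∀ row ∈ dist.take r.toNat, c ≤ (row.length : Int)) ∧
    ((∀ i < r.toNat, ∀ j < c.toNat, ¬ ((dist.getD i []).getD j 0 > k)) ∨
     (r ≤ (mat.length : Int) ∧ ∀ row ∈ mat.take r.toNat, c ≤ (row.length : Int)) ∨
     (∃ i < r.toNat, ∃ j < c.toNat,
        i < mat.length ∧ j < (mat.getD i []).length ∧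
        (∀ i' < i, c ≤ ((mat.getD i' []).length : Int)) ∧
        (mat.getD i []).getD j 0 = 0 ∧
        (∀ i' < r.toNat, ∀ j' < c.toNat, (dist.getD i' []).getD j' 0 > k →
          |(i : Int) - (i' : Int)| + |(j : Int) - (j' : Int)| ≤ k))))
instance (k : Int) (r : Int) (c : Int) (dist : List (List Int)) (mat : List (List Int)) : Decidable (Pre_withinK k r c dist mat) := by unfold Pre_withinK; infer_instance

def pvWitness_withinK : Int × Int × Int × List (List Int) × List (List Int) :=
  (1, 1, 1, [[0]], [[1]])

def Spec_withinK (k : Int) (r : Int) (c : Int) (dist : List (List Int)) (mat : List (List Int)) (out : Bool) : Prop := out = withinK_alt k r c dist mat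
instance (k : Int) (r : Int) (c : Int) (dist : List (List Int)) (mat : List (List Int)) (out : Bool) : Decidable (Spec_withinK k r c dist mat out) := by unfold Spec_withinK; infer_instance

-- ===== CLAIM (what is proved, stated in full; the proofs are below) =====
def Claim_equal_withinK : Prop := ∀ (k : Int) (r : Int) (c : Int) (dist : List (List Int)) (mat : List (List Int)), Dom_withinK k r c dist mat → Pre_withinK k r c dist mat → Spec_withinK k r c dist mat (withinK k r c dist mat)

-- ===== LEMMAS AND PROOFS =====

-- A's inner loop: conditional append to both components of a pair of lists.
theorem pv_pairfold_if (p : Int → Prop) [DecidablePred p] (f g : Int → Int)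
    (L : List Int) (a b : List Int) :
    L.foldl (fun acc x => if p x then (acc.1 ++ [f x], acc.2 ++ [g x]) else acc) (a, b)
      = (a ++ (L.filter (fun x => decide (p x))).map f,
         b ++ (L.filter (fun x => decide (p x))).map g) := by
  induction L generalizing a b with
  | nil => simp
  | cons x t ih =>
    by_cases hx : p x <;> simp [hx, ih]

-- A's outer loop: unconditional append of per-row blocks to both components.
theorem pv_pairfold_app (F G : Int → List Int) (L : List Int) (a b : List Int) :
    L.foldl (fun acc x => (acc.1 ++ F x, acc.2 ++ G x)) (a, b)
      = (a ++ L.flatMap F, b ++ L.flatMap G) := by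
  induction L generalizing a b with
  | nil => simp
  | cons x t ih => simp [ih]

-- |min L - x| ≤ k ∧ |max L - x| ≤ k  ↔  every element of L is within k of x.
theorem pv_minmax_abs (L : List Int) (hL : L ≠ []) (x k : Int) :
    (|(PySem.List.min? L (fun y => y)).getD 0 - x| ≤ k ∧
     |(PySem.List.max? L (fun y => y)).getD 0 - x| ≤ k) ↔ ∀ v ∈ L, |v - x| ≤ k := by
  obtain ⟨m, hm⟩ : ∃ m, PySem.List.min? L (fun y => y) = some m := by
    cases h : PySem.List.min? L (fun y => y) with
    | none => exact absurd ((PySem.List.min?_eq_none_iff _ _).mp h) hL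
    | some m => exact ⟨m, rfl⟩
  obtain ⟨M, hM⟩ : ∃ M, PySem.List.max? L (fun y => y) = some M := by
    cases h : PySem.List.max? L (fun y => y) with
    | none => exact absurd ((PySem.List.max?_eq_none_iff _ _).mp h) hL
    | some M => exact ⟨M, rfl⟩
  have hmmem := PySem.List.min?_mem hm
  have hMmem := PySem.List.max?_mem hM
  have hmin := PySem.List.min?_isMin hm
  have hmax := PySem.List.max?_isMax hM
  rw [hm, hM]
  simp only [Option.getD_some]
  constructor
  · rintro ⟨h1, h2⟩ v hv
    have := hmin v hv
    have := hmax v hv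
    rw [abs_le] at *
    omega
  · intro h
    exact ⟨h m hmmem, h M hMmem⟩

-- The Chebyshev identity per element: |a+b| ≤ k ∧ |a-b| ≤ k ↔ |a| + |b| ≤ k.
theorem pv_cheb (a b k : Int) : (|a + b| ≤ k ∧ |a - b| ≤ k) ↔ |a| + |b| ≤ k := by
  rcases abs_cases a with ⟨h1, _⟩ | ⟨h1, _⟩ <;>
  rcases abs_cases b with ⟨h2, _⟩ | ⟨h2, _⟩ <;>
  rcases abs_cases (a + b) with ⟨h3, _⟩ | ⟨h3, _⟩ <;>
  rcases abs_cases (a - b) with ⟨h4, _⟩ | ⟨h4, _⟩ <;>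
  rw [h1, h2, h3, h4] <;> omega

-- Per-cell equivalence of A's four-extreme check with B's direct scan over the far cells.
theorem pv_cell (far : List (Int × Int)) (hfar : far ≠ []) (k r0 c0 : Int) :
    decide (max (max (max
        |(PySem.List.min? (far.map (fun p => p.1 + p.2)) (fun y => y)).getD 0 - (r0 + c0)|
        |(PySem.List.max? (far.map (fun p => p.1 + p.2)) (fun y => y)).getD 0 - (r0 + c0)|)
        |(PySem.List.min? (far.map (fun p => p.1 - p.2)) (fun y => y)).getD 0 - (r0 - c0)|)
        |(PySem.List.max? (far.map (fun p => p.1 - p.2)) (fun y => y)).getD 0 - (r0 - c0)| ≤ k)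
      = far.all (fun p => decide (|r0 - p.1| + |c0 - p.2| ≤ k)) := by
  have hplus : far.map (fun p => p.1 + p.2) ≠ [] := by simpa using hfar
  have hminus : far.map (fun p => p.1 - p.2) ≠ [] := by simpa using hfar
  rw [Bool.eq_iff_iff]
  simp only [decide_eq_true_eq, List.all_eq_true, decide_eq_true_eq, max_le_iff]
  rw [show ∀ A B C D : Prop, (((A ∧ B) ∧ C) ∧ D) ↔ ((A ∧ B) ∧ (C ∧ D)) from by tauto]
  rw [pv_minmax_abs _ hplus, pv_minmax_abs _ hminus]
  simp only [List.forall_mem_map]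
  constructor
  · rintro ⟨h1, h2⟩ p hp
    have := (pv_cheb (r0 - p.1) (c0 - p.2) k).mp
      ⟨by have := h1 p hp; rw [abs_sub_comm] at this; convert this using 2; ring,
       by have := h2 p hp; rw [abs_sub_comm] at this; convert this using 2; ring⟩
    exact this
  · intro h
    refine ⟨fun p hp => ?_, fun p hp => ?_⟩ <;>
      have := (pv_cheb (r0 - p.1) (c0 - p.2) k).mpr (h p hp)
    · rw [abs_sub_comm]; convert this.1 using 2; ring
    · rw [abs_sub_comm]; convert this.2 using 2; ring

-- ===== VERDICT (by name: the statement is the Claim_ definition above) =====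
theorem withinK_spec : Claim_equal_withinK := by
  intro k r c dist mat _ _
  unfold Spec_withinK withinK withinK_alt
  set far : List (Int × Int) :=
    (PySem.List.pyRange 0 r 1).flatMap (fun r0 =>
      ((PySem.List.pyRange 0 c 1).filter (fun c0 =>
        decide (PySem.List.pyGetD (PySem.List.pyGetD dist r0 []) c0 0 > k))).map
        (fun c0 => (r0, c0))) with hfardef
  have hpm :
      (PySem.List.pyRange 0 r 1).foldl (fun acc r0 =>
        (PySem.List.pyRange 0 c 1).foldl (fun acc c0 =>
          if PySem.List.pyGetD (PySem.List.pyGetD dist r0 []) c0 0 > k then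
            (acc.1 ++ [r0 + c0], acc.2 ++ [r0 - c0])
          else acc) acc) (([], []) : List Int × List Int)
        = (far.map (fun p => p.1 + p.2), far.map (fun p => p.1 - p.2)) := by
    have hstep : ∀ (acc : List Int × List Int) (r0 : Int),
        (PySem.List.pyRange 0 c 1).foldl (fun acc c0 =>
          if PySem.List.pyGetD (PySem.List.pyGetD dist r0 []) c0 0 > k then
            (acc.1 ++ [r0 + c0], acc.2 ++ [r0 - c0])
          else acc) acc
        = (acc.1 ++ ((PySem.List.pyRange 0 c 1).filter (fun c0 =>
              decide (PySem.List.pyGetD (PySem.List.pyGetD dist r0 []) c0 0 > k))).map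
              (fun c0 => r0 + c0),
           acc.2 ++ ((PySem.List.pyRange 0 c 1).filter (fun c0 =>
              decide (PySem.List.pyGetD (PySem.List.pyGetD dist r0 []) c0 0 > k))).map
              (fun c0 => r0 - c0)) := by
      intro acc r0
      obtain ⟨a, b⟩ := acc
      exact pv_pairfold_if _ _ _ _ a b
    rw [show (fun (acc : List Int × List Int) r0 =>
        (PySem.List.pyRange 0 c 1).foldl (fun acc c0 =>
          if PySem.List.pyGetD (PySem.List.pyGetD dist r0 []) c0 0 > k then
            (acc.1 ++ [r0 + c0], acc.2 ++ [r0 - c0])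
          else acc) acc) = (fun (acc : List Int × List Int) r0 =>
          (acc.1 ++ ((PySem.List.pyRange 0 c 1).filter (fun c0 =>
              decide (PySem.List.pyGetD (PySem.List.pyGetD dist r0 []) c0 0 > k))).map
              (fun c0 => r0 + c0),
           acc.2 ++ ((PySem.List.pyRange 0 c 1).filter (fun c0 =>
              decide (PySem.List.pyGetD (PySem.List.pyGetD dist r0 []) c0 0 > k))).map
              (fun c0 => r0 - c0)))
      from funext fun acc => funext fun r0 => hstep acc r0]
    rw [pv_pairfold_app]
    rw [hfardef]
    simp [List.map_flatMap, List.map_map, Function.comp_def]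
  rw [hpm]
  simp only []
  by_cases hfar : far = []
  · simp [hfar]
  · have hplusne : far.map (fun p => p.1 + p.2) ≠ [] := by simpa using hfar
    rw [if_neg (by simpa using hfar), if_neg hfar]
    apply congrArg
    funext r0
    apply congrArg
    funext c0
    by_cases hm : PySem.List.pyGetD (PySem.List.pyGetD mat r0 []) c0 0 = 0
    · rw [if_pos hm, if_pos hm]
      exact pv_cell far hfar k r0 c0
    · rw [if_neg hm, if_neg hm]
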